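-- pv_equiv track=rewrite | github.com/Chandrica5/python | pro23.py | replace_with_highest_factor
-- ===== SOURCE A (Python) =====
-- def highest_factor(digit):
--     if digit==0|digit==1:
--         return digit
--     for i in range(digit//2,0,-1):
--         if digit%i==0:
--             return i
--     return digit
--
-- def replace_with_highest_factor(num):
--     place=1
--     result=0
--     while num>0:
--         digit=num%10
--         num//=10
--         highest=highest_factor(digit)
--         result=(highest*place)+result
--         place*=10
--     return result
-- ===== SOURCE B (Python) =====
-- # Largest proper factor of each digit, precomputed once (digits 0 and 1 map to themselves).
-- FACTORS = (0, 1, 1, 1, 2, 1, 3, 1, 4, 3)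
--
-- def replace_with_highest_factor(num):
--     if num <= 0:
--         return 0
--     return replace_with_highest_factor(num // 10) * 10 + FACTORS[num % 10]
-- ===== Notes on version B (the rewrite author's own statement) =====
-- stated objective: simpler
-- what changed: Replaces A's trial-division inner loop with a fixed per-digit lookup table and A's while-loop with place/result accumulators by a direct recursion that strips the last digit and rebuilds the number most-significant-first.
import Mathlib
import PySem

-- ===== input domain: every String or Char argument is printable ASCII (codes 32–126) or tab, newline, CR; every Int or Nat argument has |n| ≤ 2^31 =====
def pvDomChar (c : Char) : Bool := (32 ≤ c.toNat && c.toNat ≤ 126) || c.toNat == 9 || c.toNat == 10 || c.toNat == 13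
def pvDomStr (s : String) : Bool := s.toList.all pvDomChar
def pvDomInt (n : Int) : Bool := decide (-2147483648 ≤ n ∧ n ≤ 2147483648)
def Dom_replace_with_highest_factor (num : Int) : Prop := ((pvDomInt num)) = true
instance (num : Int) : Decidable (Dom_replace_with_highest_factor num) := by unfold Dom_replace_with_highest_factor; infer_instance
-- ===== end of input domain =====

-- ===== PORT A =====
-- B replaces A's trial-division inner loop by a lookup table and the while-loop by direct recursion (objective: simpler); return value only, no mutation.
def hfLoop (digit : Int) : List Int → Int
  | [] => digit
  | i :: rest => if PySem.Int.mod digit i = 0 then i else hfLoop digit rest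

def highest_factor (digit : Int) : Int :=
  -- Python 'digit==0|digit==1' parses as the chained comparison digit == (0|digit) == 1
  if digit = Int.lor 0 digit ∧ Int.lor 0 digit = 1 then digit
  else hfLoop digit (PySem.List.pyRange (PySem.Int.floordiv digit 2) 0 (-1))

def rwhfLoop (num place result : Int) : Int :=
  if h : num > 0 then
    rwhfLoop (PySem.Int.floordiv num 10) (place * 10)
      (highest_factor (PySem.Int.mod num 10) * place + result)
  else result
termination_by num.toNat
decreasing_by
  rw [PySem.Int.floordiv_eq_ediv_of_pos (by omega : (0:Int) < 10)]; omega

def replace_with_highest_factor (num : Int) : Int := rwhfLoop num 1 0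

-- ===== PORT B =====
def FACTORS : List Int := [0, 1, 1, 1, 2, 1, 3, 1, 4, 3]

def replace_with_highest_factor_alt (num : Int) : Int :=
  if h : num ≤ 0 then 0
  else
    replace_with_highest_factor_alt (PySem.Int.floordiv num 10) * 10 +
      -- index num % 10 is always in 0..9, so the .getD default is never used
      (PySem.List.pyGet? FACTORS (PySem.Int.mod num 10)).getD 0
termination_by num.toNat
decreasing_by
  rw [PySem.Int.floordiv_eq_ediv_of_pos (by omega : (0:Int) < 10)]; omega

-- ===== PRECONDITION & SPEC =====
def Spec_replace_with_highest_factor (num : Int) (out : Int) : Prop := out = replace_with_highest_factor_alt num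
instance (num : Int) (out : Int) : Decidable (Spec_replace_with_highest_factor num out) := by unfold Spec_replace_with_highest_factor; infer_instance

-- ===== CLAIM (what is proved, stated in full; the proofs are below) =====
def Claim_equal_replace_with_highest_factor : Prop := ∀ (num : Int), Dom_replace_with_highest_factor num → Spec_replace_with_highest_factor num (replace_with_highest_factor num)

-- ===== LEMMAS AND PROOFS =====


lemma hf_table (d : Int) (h0 : 0 ≤ d) (h9 : d < 10) :
    highest_factor d = (PySem.List.pyGet? FACTORS d).getD 0 := by
  interval_cases d <;> decide

lemma mod10_bounds (num : Int) : 0 ≤ PySem.Int.mod num 10 ∧ PySem.Int.mod num 10 < 10 := by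
  rw [PySem.Int.mod_eq_emod_of_pos (by omega : (0:Int) < 10)]; omega

lemma loop_eq (n : Nat) : ∀ num place result : Int, num.toNat = n →
    rwhfLoop num place result = result + replace_with_highest_factor_alt num * place := by
  induction n using Nat.strong_induction_on with
  | _ n ih =>
    intro num place result hn
    by_cases h : num > 0
    · have hlt : (PySem.Int.floordiv num 10).toNat < num.toNat := by
        rw [PySem.Int.floordiv_eq_ediv_of_pos (by omega : (0:Int) < 10)]; omega
      rw [rwhfLoop, dif_pos h,
        ih (PySem.Int.floordiv num 10).toNat (hn ▸ hlt) _ _ _ rfl,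
        hf_table _ (mod10_bounds num).1 (mod10_bounds num).2]
      conv_rhs => rw [replace_with_highest_factor_alt]
      rw [dif_neg (by omega : ¬ num ≤ 0)]
      ring
    · rw [rwhfLoop, dif_neg h, replace_with_highest_factor_alt, dif_pos (by omega : num ≤ 0)]
      ring

-- ===== VERDICT (by name: the statement is the Claim_ definition above) =====
theorem replace_with_highest_factor_spec : Claim_equal_replace_with_highest_factor := by
  intro num _
  unfold Spec_replace_with_highest_factor replace_with_highest_factor
  rw [loop_eq num.toNat num 1 0 rfl]; ring
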